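-- pv_equiv track=rewrite | github.com/Milan6299/ANN-Assignment | ga.py | compute_max_weight_length
-- ===== SOURCE A (Python) =====
-- def compute_max_weight_length(n_inputs, max_hidden, max_neurons):
--     lengths = []
--     prev = n_inputs
--     for _ in range(max_hidden):
--         lengths.append(prev * max_neurons + max_neurons)  # weights + biases
--         prev = max_neurons
--     # final output layer (to one output neuron)
--     lengths.append(prev * 1 + 1)
--     return sum(lengths), lengths
-- ===== SOURCE B (Python) =====
-- def compute_max_weight_length(n_inputs, max_hidden, max_neurons):
--     # Closed form: only the first hidden layer depends on n_inputs; all later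
--     # hidden layers cost max_neurons*(max_neurons+1) each, the output layer
--     # max_neurons+1 (or n_inputs+1 with no hidden layers).
--     h = max(max_hidden, 0)
--     if h == 0:
--         return n_inputs + 1, [n_inputs + 1]
--     per = max_neurons * (max_neurons + 1)
--     total = (n_inputs + 1) * max_neurons + (h - 1) * per + max_neurons + 1
--     lengths = [n_inputs * max_neurons + max_neurons] + [per] * (h - 1) + [max_neurons + 1]
--     return total, lengths
-- ===== Notes on version B (the rewrite author's own statement) =====
-- stated objective: faster
-- what changed: B replaces A's prev-threading loop by a closed form: the total is computed arithmetically in O(1) ((n_inputs+1)*mn + (h-1)*mn*(mn+1) + mn + 1) and the lengths list is built as first-layer term + replicated constant + output term, with no loop and no running accumulator or summation pass.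
import Mathlib
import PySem

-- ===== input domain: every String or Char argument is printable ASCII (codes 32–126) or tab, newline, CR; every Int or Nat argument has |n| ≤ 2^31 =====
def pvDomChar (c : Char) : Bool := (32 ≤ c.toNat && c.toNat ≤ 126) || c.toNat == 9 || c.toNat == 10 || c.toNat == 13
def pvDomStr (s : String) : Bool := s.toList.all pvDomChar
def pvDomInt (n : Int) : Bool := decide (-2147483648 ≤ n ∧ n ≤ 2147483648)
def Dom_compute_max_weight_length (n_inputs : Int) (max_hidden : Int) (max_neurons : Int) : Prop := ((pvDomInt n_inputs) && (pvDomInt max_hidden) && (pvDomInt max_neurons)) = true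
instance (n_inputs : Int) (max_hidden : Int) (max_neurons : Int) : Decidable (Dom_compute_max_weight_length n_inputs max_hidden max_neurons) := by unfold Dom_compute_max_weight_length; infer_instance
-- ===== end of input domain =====

-- B replaces A's accumulator loop by a closed-form case analysis: total computed
-- arithmetically, lengths as first-layer term + replicated constant + output term.

-- ===== PORT A =====
-- for _ in range(max_hidden): lengths.append(prev*max_neurons+max_neurons); prev = max_neurons
-- lengths accumulated reversed (append = cons) and reversed at loop end
def compute_max_weight_length (n_inputs : Int) (max_hidden : Int) (max_neurons : Int) : Int × List Int :=
  let st := (PySem.List.pyRange 0 max_hidden 1).foldl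
    (fun (st : List Int × Int) _ => ((st.2 * max_neurons + max_neurons) :: st.1, max_neurons))
    ([], n_inputs)
  let lengths := st.1.reverse ++ [st.2 * 1 + 1]
  (lengths.sum, lengths)

-- ===== PORT B =====
-- h = max(max_hidden, 0); closed-form total; lengths = [ni*mn+mn] + [mn*(mn+1)]*(h-1) + [mn+1]
def compute_max_weight_length_alt (n_inputs : Int) (max_hidden : Int) (max_neurons : Int) : Int × List Int :=
  let h : Int := max max_hidden 0
  if h = 0 then (n_inputs + 1, [n_inputs + 1])
  else
    let per := max_neurons * (max_neurons + 1)
    let total := (n_inputs + 1) * max_neurons + (h - 1) * per + max_neurons + 1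
    (total, (n_inputs * max_neurons + max_neurons) :: (List.replicate (h - 1).toNat per ++ [max_neurons + 1]))

-- ===== PRECONDITION & SPEC =====
def Spec_compute_max_weight_length (n_inputs : Int) (max_hidden : Int) (max_neurons : Int) (out : Int × List Int) : Prop := out = compute_max_weight_length_alt n_inputs max_hidden max_neurons
instance (n_inputs : Int) (max_hidden : Int) (max_neurons : Int) (out : Int × List Int) : Decidable (Spec_compute_max_weight_length n_inputs max_hidden max_neurons out) := by unfold Spec_compute_max_weight_length; infer_instance

-- ===== CLAIM (what is proved, stated in full; the proofs are below) =====
def Claim_equal_compute_max_weight_length : Prop := ∀ (n_inputs : Int) (max_hidden : Int) (max_neurons : Int), Dom_compute_max_weight_length n_inputs max_hidden max_neurons → Spec_compute_max_weight_length n_inputs max_hidden max_neurons (compute_max_weight_length n_inputs max_hidden max_neurons)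

-- ===== LEMMAS AND PROOFS =====

-- canonical layer-count list: pvG mn n ni = lengths for n hidden layers starting at width ni
def pvG (mn : Int) : Nat → Int → List Int
  | 0, ni => [ni * 1 + 1]
  | n+1, ni => (ni * mn + mn) :: pvG mn n mn

theorem pvFoldA (mn : Int) (l : List Int) (acc : List Int) (ni : Int) :
    (l.foldl (fun (st : List Int × Int) _ => ((st.2 * mn + mn) :: st.1, mn)) (acc, ni)).1.reverse
      ++ [(l.foldl (fun (st : List Int × Int) _ => ((st.2 * mn + mn) :: st.1, mn)) (acc, ni)).2 * 1 + 1]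
    = acc.reverse ++ pvG mn l.length ni := by
  induction l generalizing acc ni with
  | nil => simp [pvG]
  | cons x xs ih =>
    simp only [List.foldl_cons, List.length_cons, pvG]
    rw [ih]
    simp

theorem pvGclosed (mn ni : Int) (n : Nat) :
    pvG mn (n + 1) ni
      = (ni * mn + mn) :: (List.replicate n (mn * (mn + 1)) ++ [mn + 1]) := by
  induction n generalizing ni with
  | zero => simp [pvG]
  | succ n ih =>
    show (ni * mn + mn) :: pvG mn (n + 1) mn = _
    rw [ih]
    simp only [List.replicate_succ, List.cons_append]
    congr 2
    ring

theorem pvGsum (mn ni : Int) (n : Nat) :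
    (pvG mn (n + 1) ni).sum
      = (ni + 1) * mn + (n : Int) * (mn * (mn + 1)) + mn + 1 := by
  rw [pvGclosed]
  simp [List.sum_replicate]
  ring

theorem pvEq (ni mh mn : Int) :
    compute_max_weight_length ni mh mn = compute_max_weight_length_alt ni mh mn := by
  unfold compute_max_weight_length compute_max_weight_length_alt
  simp only
  have hA := pvFoldA mn (PySem.List.pyRange 0 mh 1) [] ni
  have hlen : (PySem.List.pyRange 0 mh 1).length = mh.toNat := by
    rw [PySem.List.length_pyRange_one]; omega
  rw [hlen] at hA
  simp only [List.reverse_nil, List.nil_append] at hA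
  rw [hA]
  rcases Nat.eq_zero_or_eq_succ_pred mh.toNat with h0 | hs
  · have hm : max mh 0 = 0 := by omega
    rw [h0, hm]
    simp [pvG]
  · have hpos : 0 < mh.toNat := by omega
    obtain ⟨n, hn⟩ : ∃ n, mh.toNat = n + 1 := ⟨mh.toNat - 1, by omega⟩
    have hm : max mh 0 = (mh.toNat : Int) := by omega
    have hne : (mh.toNat : Int) ≠ 0 := by omega
    rw [hm, if_neg hne, hn]
    have h1 : ((((n : Int) + 1) - 1)).toNat = n := by omega
    have h2 : ((n + 1 : Nat) : Int) = (n : Int) + 1 := by push_cast; ring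
    rw [h2, pvGsum, pvGclosed, h1]
    norm_num

-- ===== VERDICT (by name: the statement is the Claim_ definition above) =====
theorem compute_max_weight_length_spec : Claim_equal_compute_max_weight_length := by
  intro ni mh mn _
  unfold Spec_compute_max_weight_length
  exact pvEq ni mh mn
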